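-- pv_equiv track=rewrite | github.com/Ana-1123/MachineTranslation_course | Lab5/main.py | fills_alignment_gap
-- ===== SOURCE A (Python) =====
-- def fills_alignment_gap(eng_idx, ro_idx, union, intersection, eng_len, ro_len):
--     #Check if a point fills an alignment gap
--     nearby_intersection = 0
--     for de in [-1, 0, 1]:
--         for dr in [-1, 0, 1]:
--             if de == 0 and dr == 0: # Skips the center position (0,0) - that's the point we're testing
--                 continue
--             ne, nr = eng_idx + de, ro_idx + dr
--             if 0 <= ne < eng_len and 0 <= nr < ro_len: # Ensures we don't go outside the matrix boundaries
--                 if (ne, nr) in intersection: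
--                     nearby_intersection += 1
--
--     # If surrounded by intersection points, likely a missing alignment
--     return nearby_intersection >= 2
-- ===== SOURCE B (Python) =====
-- def fills_alignment_gap(eng_idx, ro_idx, union, intersection, eng_len, ro_len):
--     # Count distinct intersection points adjacent (Chebyshev distance 1) to the
--     # center and inside the matrix, instead of scanning the 3x3 neighborhood.
--     count = 0
--     for (pe, pr) in set(intersection):
--         if (pe, pr) != (eng_idx, ro_idx) \
--            and abs(pe - eng_idx) <= 1 and abs(pr - ro_idx) <= 1 \
--            and 0 <= pe < eng_len and 0 <= pr < ro_len:
--             count += 1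
--     return count >= 2
-- ===== Notes on version B (the rewrite author's own statement) =====
-- stated objective: alternative
-- what changed: B iterates once over the distinct intersection points, counting those within Chebyshev distance 1 of the center and in bounds, instead of A's 3x3 offset scan with a membership test into the intersection list per neighbor.
import Mathlib
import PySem

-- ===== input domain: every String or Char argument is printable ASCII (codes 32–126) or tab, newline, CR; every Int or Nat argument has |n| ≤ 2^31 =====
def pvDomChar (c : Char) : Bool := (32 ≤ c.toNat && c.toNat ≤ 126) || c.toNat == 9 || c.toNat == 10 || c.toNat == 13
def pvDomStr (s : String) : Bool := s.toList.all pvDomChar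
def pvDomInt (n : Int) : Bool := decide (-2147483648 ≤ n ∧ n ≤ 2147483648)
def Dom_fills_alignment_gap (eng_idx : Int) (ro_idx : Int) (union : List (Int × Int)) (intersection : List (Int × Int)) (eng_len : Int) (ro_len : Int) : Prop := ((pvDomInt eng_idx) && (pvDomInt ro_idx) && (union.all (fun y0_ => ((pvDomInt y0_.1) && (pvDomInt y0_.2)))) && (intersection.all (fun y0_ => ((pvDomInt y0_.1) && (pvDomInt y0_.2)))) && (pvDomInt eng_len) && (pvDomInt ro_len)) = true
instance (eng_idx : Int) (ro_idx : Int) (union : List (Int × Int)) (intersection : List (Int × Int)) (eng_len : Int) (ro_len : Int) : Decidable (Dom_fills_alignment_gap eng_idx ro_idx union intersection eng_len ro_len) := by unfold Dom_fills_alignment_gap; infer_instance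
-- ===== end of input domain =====

-- B replaces A's 3x3 offset scan (one membership test into `intersection` per neighbor) by a
-- single pass over the distinct intersection points, counting those adjacent to the center
-- and in bounds (objective: alternative decomposition, same cost).

-- ===== PORT A =====
def fills_alignment_gap (eng_idx : Int) (ro_idx : Int) (union : List (Int × Int)) (intersection : List (Int × Int)) (eng_len : Int) (ro_len : Int) : Bool :=
  -- nearby_intersection accumulated over the 3x3 offset scan, then compared with 2
  decide (2 ≤ (List.foldl (fun acc de =>
    List.foldl (fun acc dr =>
      if de = 0 ∧ dr = 0 then acc
      else
        let ne := eng_idx + de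
        let nr := ro_idx + dr
        if 0 ≤ ne ∧ ne < eng_len ∧ 0 ≤ nr ∧ nr < ro_len then
          if (ne, nr) ∈ intersection then acc + 1 else acc
        else acc) acc ([-1, 0, 1] : List Int)) 0 ([-1, 0, 1] : List Int) : Int))

-- ===== PORT B =====
def fills_alignment_gap_alt (eng_idx : Int) (ro_idx : Int) (union : List (Int × Int)) (intersection : List (Int × Int)) (eng_len : Int) (ro_len : Int) : Bool :=
  -- one pass over set(intersection), counting adjacent in-bounds points, then compared with 2
  decide (2 ≤ (List.foldl (fun acc p =>
    if ¬(p = (eng_idx, ro_idx)) ∧ |p.1 - eng_idx| ≤ 1 ∧ |p.2 - ro_idx| ≤ 1 ∧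
        0 ≤ p.1 ∧ p.1 < eng_len ∧ 0 ≤ p.2 ∧ p.2 < ro_len then
      acc + 1
    else acc) 0 (PySem.Set.ofList intersection) : Int))

-- ===== PRECONDITION & SPEC =====
def Spec_fills_alignment_gap (eng_idx : Int) (ro_idx : Int) (union : List (Int × Int)) (intersection : List (Int × Int)) (eng_len : Int) (ro_len : Int) (out : Bool) : Prop := out = fills_alignment_gap_alt eng_idx ro_idx union intersection eng_len ro_len
instance (eng_idx : Int) (ro_idx : Int) (union : List (Int × Int)) (intersection : List (Int × Int)) (eng_len : Int) (ro_len : Int) (out : Bool) : Decidable (Spec_fills_alignment_gap eng_idx ro_idx union intersection eng_len ro_len out) := by unfold Spec_fills_alignment_gap; infer_instance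

-- ===== CLAIM (what is proved, stated in full; the proofs are below) =====
def Claim_equal_fills_alignment_gap : Prop := ∀ (eng_idx : Int) (ro_idx : Int) (union : List (Int × Int)) (intersection : List (Int × Int)) (eng_len : Int) (ro_len : Int), Dom_fills_alignment_gap eng_idx ro_idx union intersection eng_len ro_len → Spec_fills_alignment_gap eng_idx ro_idx union intersection eng_len ro_len (fills_alignment_gap eng_idx ro_idx union intersection eng_len ro_len)

-- ===== LEMMAS AND PROOFS =====

-- A's per-neighbor predicate: in bounds and in the intersection list
def pvPA (elen rlen : Int) (l : List (Int × Int)) (p : Int × Int) : Bool :=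
  decide ((0 ≤ p.1 ∧ p.1 < elen ∧ 0 ≤ p.2 ∧ p.2 < rlen) ∧ p ∈ l)

-- B's per-point predicate
def pvQB (e r elen rlen : Int) (p : Int × Int) : Bool :=
  decide (¬(p = (e, r)) ∧ |p.1 - e| ≤ 1 ∧ |p.2 - r| ≤ 1 ∧
          0 ≤ p.1 ∧ p.1 < elen ∧ 0 ≤ p.2 ∧ p.2 < rlen)

-- the eight neighbor positions, in A's scan order
def pvNs8 (e r : Int) : List (Int × Int) :=
  [(e + -1, r + -1), (e + -1, r + 0), (e + -1, r + 1),
   (e + 0, r + -1), (e + 0, r + 1),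
   (e + 1, r + -1), (e + 1, r + 0), (e + 1, r + 1)]

-- contribution of one offset step of A's scan
def pvTIn (e r elen rlen : Int) (l : List (Int × Int)) (de dr : Int) : Int :=
  if de = 0 ∧ dr = 0 then 0
  else if pvPA elen rlen l (e + de, r + dr) then 1 else 0

lemma mem_pvNs8 (e r : Int) (p : Int × Int) :
    p ∈ pvNs8 e r ↔ ¬(p = (e, r)) ∧ |p.1 - e| ≤ 1 ∧ |p.2 - r| ≤ 1 := by
  rcases p with ⟨a, b⟩
  simp only [pvNs8, List.mem_cons, List.not_mem_nil, or_false, Prod.mk.injEq, abs_le,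
    not_and]
  constructor
  · intro h
    omega
  · intro h
    omega

lemma nodup_pvNs8 (e r : Int) : (pvNs8 e r).Nodup := by
  simp only [pvNs8, List.nodup_cons, List.mem_cons, List.not_mem_nil, or_false,
    List.nodup_nil, and_true, Prod.mk.injEq, not_or, not_and]
  norm_num

-- a fold whose step adds a per-element amount is the sum of those amounts
lemma foldl_stepsum {α : Type} (g : Int → α → Int) (t : α → Int)
    (h : ∀ acc x, g acc x = acc + t x) :
    ∀ (xs : List α) (acc : Int), List.foldl g acc xs = acc + (xs.map t).sum := by
  intro xs
  induction xs with
  | nil => simp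
  | cons x xs ih => intro acc; simp [List.foldl_cons, h, ih, add_assoc]

-- one step of A's inner loop adds pvTIn
lemma pv_hinner (e r elen rlen : Int) (l : List (Int × Int)) (de : Int) :
    ∀ (acc dr : Int),
      (if de = 0 ∧ dr = 0 then acc
       else
         let ne := e + de
         let nr := r + dr
         if 0 ≤ ne ∧ ne < elen ∧ 0 ≤ nr ∧ nr < rlen then
           if (ne, nr) ∈ l then acc + 1 else acc
         else acc) = acc + pvTIn e r elen rlen l de dr := by
  intro acc dr
  simp only [pvTIn, pvPA, decide_eq_true_eq]
  by_cases h0 : de = 0 ∧ dr = 0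
  · rw [if_pos h0, if_pos h0, add_zero]
  · rw [if_neg h0, if_neg h0]
    show (if 0 ≤ e + de ∧ e + de < elen ∧ 0 ≤ r + dr ∧ r + dr < rlen then
            if (e + de, r + dr) ∈ l then acc + 1 else acc
          else acc) = _
    by_cases h1 : 0 ≤ e + de ∧ e + de < elen ∧ 0 ≤ r + dr ∧ r + dr < rlen
    · by_cases h2 : (e + de, r + dr) ∈ l
      · rw [if_pos h1, if_pos h2, if_pos ⟨h1, h2⟩]
      · rw [if_pos h1, if_neg h2, if_neg (by tauto), add_zero]
    · rw [if_neg h1, if_neg (by tauto), add_zero]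

-- A's double loop counts the in-bounds neighbors that lie in the intersection
lemma countA_eq (e r elen rlen : Int) (l : List (Int × Int)) :
    (List.foldl (fun acc de =>
      List.foldl (fun acc dr =>
        if de = 0 ∧ dr = 0 then acc
        else
          let ne := e + de
          let nr := r + dr
          if 0 ≤ ne ∧ ne < elen ∧ 0 ≤ nr ∧ nr < rlen then
            if (ne, nr) ∈ l then acc + 1 else acc
          else acc) acc ([-1, 0, 1] : List Int)) 0 ([-1, 0, 1] : List Int) : Int)
      = ((pvNs8 e r).countP (pvPA elen rlen l) : Int) := by
  rw [foldl_stepsum _ (fun de => (([-1, 0, 1] : List Int).map (pvTIn e r elen rlen l de)).sum)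
        (fun acc de => foldl_stepsum _ _ (pv_hinner e r elen rlen l de) _ acc)]
  simp only [List.map_cons, List.map_nil, List.sum_cons, List.sum_nil, pvNs8,
    List.countP_cons, List.countP_nil, pvTIn]
  norm_num only
  simp only [and_false, and_true, and_self, if_true, if_false]
  push_cast
  ring

-- B's loop counts the distinct intersection points satisfying pvQB
lemma foldB_countP (e r elen rlen : Int) :
    ∀ (S : List (Int × Int)) (acc : Int),
      List.foldl (fun acc p =>
        if ¬(p = (e, r)) ∧ |p.1 - e| ≤ 1 ∧ |p.2 - r| ≤ 1 ∧
            0 ≤ p.1 ∧ p.1 < elen ∧ 0 ≤ p.2 ∧ p.2 < rlen then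
          acc + 1
        else acc) acc S = acc + (S.countP (pvQB e r elen rlen) : Int) := by
  intro S
  induction S with
  | nil => simp
  | cons p S ih =>
    intro acc
    simp only [List.foldl_cons, List.countP_cons, ih, pvQB]
    by_cases hc : ¬(p = (e, r)) ∧ |p.1 - e| ≤ 1 ∧ |p.2 - r| ≤ 1 ∧
        0 ≤ p.1 ∧ p.1 < elen ∧ 0 ≤ p.2 ∧ p.2 < rlen
    · simp only [if_pos hc, decide_eq_true_eq]
      push_cast
      ring
    · simp only [decide_eq_true_eq, if_neg hc, add_zero]

-- the two counts agree: both count the set {p ∈ intersection | p neighbor of the center, in bounds}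
lemma countP_mid (e r elen rlen : Int) (l : List (Int × Int)) :
    (PySem.Set.ofList l).countP (pvQB e r elen rlen)
      = (pvNs8 e r).countP (pvPA elen rlen l) := by
  rw [List.countP_eq_length_filter, List.countP_eq_length_filter]
  apply List.Perm.length_eq
  rw [List.perm_ext_iff_of_nodup
    ((PySem.Set.nodup_ofList l).filter _) ((nodup_pvNs8 e r).filter _)]
  intro p
  simp only [List.mem_filter, PySem.Set.mem_ofList, pvQB, pvPA, decide_eq_true_eq,
    mem_pvNs8]
  tauto

theorem fills_alignment_gap_spec_aux (eng_idx ro_idx : Int)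
    (union intersection : List (Int × Int)) (eng_len ro_len : Int) :
    fills_alignment_gap eng_idx ro_idx union intersection eng_len ro_len
      = fills_alignment_gap_alt eng_idx ro_idx union intersection eng_len ro_len := by
  unfold fills_alignment_gap fills_alignment_gap_alt
  rw [countA_eq, foldB_countP, countP_mid, zero_add]

-- ===== VERDICT (by name: the statement is the Claim_ definition above) =====
theorem fills_alignment_gap_spec : Claim_equal_fills_alignment_gap := by
  intro e r u i el rl _
  exact fills_alignment_gap_spec_aux e r u i el rl
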